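-- pv_equiv track=rewrite | github.com/tyler1zhang/Advanture_of_Code | zengxin/q3/main2.py | oneperson
-- ===== SOURCE A (Python) =====
-- def oneperson(arrows):
--     x = 0
--     y = 0
--     origin = [(x,y)]
--     for i in arrows:
--         if i == ">":
--             x += 1
--         elif i =="<":
--             x -= 1
--         elif i == "^":
--             y += 1
--         elif i == "v":
--             y -= 1
--         origin.append((x,y))
--     return origin
-- ===== SOURCE B (Python) =====
-- def oneperson(arrows):
--     # axis-split decomposition: compute the x-track and y-track independently
--     # in two staged passes, then zip them into the position list.
--     xs = [0]
--     x = 0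
--     for c in arrows:
--         x += (c == ">") - (c == "<")
--         xs.append(x)
--     ys = [0]
--     y = 0
--     for c in arrows:
--         y += (c == "^") - (c == "v")
--         ys.append(y)
--     return list(zip(xs, ys))
-- ===== Notes on version B (the rewrite author's own statement) =====
-- stated objective: alternative
-- what changed: Instead of one pass mutating an (x,y) pair and appending tuples, B computes the two coordinate tracks independently in two staged passes (boolean-arithmetic deltas, no branch chain) and zips them into the position list.
import Mathlib
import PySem

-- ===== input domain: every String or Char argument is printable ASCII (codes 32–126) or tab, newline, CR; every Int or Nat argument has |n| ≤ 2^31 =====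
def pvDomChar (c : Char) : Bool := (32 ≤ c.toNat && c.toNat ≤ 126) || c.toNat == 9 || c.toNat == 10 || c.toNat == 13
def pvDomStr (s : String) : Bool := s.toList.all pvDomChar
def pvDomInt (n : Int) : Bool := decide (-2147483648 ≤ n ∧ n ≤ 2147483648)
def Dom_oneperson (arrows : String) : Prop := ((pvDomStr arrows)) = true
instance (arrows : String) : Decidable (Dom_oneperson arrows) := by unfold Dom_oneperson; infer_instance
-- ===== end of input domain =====

-- B replaces A's single pass over an (x,y) pair by two independent per-axis passes zipped together (alternative decomposition, same cost).

-- ===== PORT A =====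
-- step-for-step port of A's loop: mutable x,y and an origin list appended each iteration
def onepersonGo : List Char → Int → Int → List (Int × Int) → List (Int × Int)
  | [], _, _, origin => origin
  | i :: rest, x, y, origin =>
    let x' := if i = '>' then x + 1 else if i = '<' then x - 1 else x
    let y' := if i = '>' then y else if i = '<' then y else if i = '^' then y + 1 else if i = 'v' then y - 1 else y
    onepersonGo rest x' y' (origin ++ [(x', y')])

def oneperson (arrows : String) : List (Int × Int) :=
  onepersonGo arrows.toList 0 0 [(0, 0)]

-- ===== PORT B =====
-- Source B: two staged per-axis passes (boolean-arithmetic deltas) producing xs and ys, then zip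
def onepersonXs : List Char → Int → List Int
  | [], _ => []
  | c :: rest, x =>
    let x' := x + (if c = '>' then 1 else 0) - (if c = '<' then 1 else 0)
    x' :: onepersonXs rest x'

def onepersonYs : List Char → Int → List Int
  | [], _ => []
  | c :: rest, y =>
    let y' := y + (if c = '^' then 1 else 0) - (if c = 'v' then 1 else 0)
    y' :: onepersonYs rest y'

def oneperson_alt (arrows : String) : List (Int × Int) :=
  List.zip (0 :: onepersonXs arrows.toList 0) (0 :: onepersonYs arrows.toList 0)

-- ===== PRECONDITION & SPEC =====
def Spec_oneperson (arrows : String) (out : List (Int × Int)) : Prop := out = oneperson_alt arrows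
instance (arrows : String) (out : List (Int × Int)) : Decidable (Spec_oneperson arrows out) := by unfold Spec_oneperson; infer_instance

-- ===== CLAIM (what is proved, stated in full; the proofs are below) =====
def Claim_equal_oneperson : Prop := ∀ (arrows : String), Dom_oneperson arrows → Spec_oneperson arrows (oneperson arrows)

-- ===== LEMMAS AND PROOFS =====
theorem onepersonGo_zip (cs : List Char) (x y : Int) (acc : List (Int × Int)) :
    onepersonGo cs x y acc = acc ++ List.zip (onepersonXs cs x) (onepersonYs cs y) := by
  induction cs generalizing x y acc with
  | nil => simp [onepersonGo, onepersonXs, onepersonYs]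
  | cons c rest ih =>
    simp only [onepersonGo, onepersonXs, onepersonYs, List.zip_cons_cons]
    rw [ih]
    have hx : (if c = '>' then x + 1 else if c = '<' then x - 1 else x) =
        x + (if c = '>' then 1 else 0) - (if c = '<' then 1 else 0) := by
      split_ifs <;> first | omega | simp_all
    have hy : (if c = '>' then y else if c = '<' then y else if c = '^' then y + 1 else if c = 'v' then y - 1 else y) =
        y + (if c = '^' then 1 else 0) - (if c = 'v' then 1 else 0) := by
      split_ifs <;> first | omega | simp_all
    rw [hx, hy]
    simp

-- ===== VERDICT (by name: the statement is the Claim_ definition above) =====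
theorem oneperson_spec : Claim_equal_oneperson := by
  intro arrows _
  unfold Spec_oneperson oneperson oneperson_alt
  rw [onepersonGo_zip]
  simp [List.zip_cons_cons]
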